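-- pv_equiv track=rewrite | github.com/priba/nmp_qc | GraphReader/graph_reader_py3.py | create_numeric_classes
-- ===== SOURCE A (Python) =====
-- def create_numeric_classes(train_classes, valid_classes, test_classes):
--
--     classes = train_classes + valid_classes + test_classes
--     uniq_classes = sorted(list(set(classes)))
--     train_classes_ = [0] * len(train_classes)
--     valid_classes_ = [0] * len(valid_classes)
--     test_classes_ = [0] * len(test_classes)
--     for ix in range(len(uniq_classes)):
--         idx = [i for i, c in enumerate(train_classes) if c == uniq_classes[ix]]
--         for i in idx:
--             train_classes_[i] = ix + 1
--         idx = [i for i, c in enumerate(valid_classes) if c == uniq_classes[ix]]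
--         for i in idx:
--             valid_classes_[i] = ix + 1
--         idx = [i for i, c in enumerate(test_classes) if c == uniq_classes[ix]]
--         for i in idx:
--             test_classes_[i] = ix + 1
--
--     return train_classes_, valid_classes_, test_classes_
-- ===== SOURCE B (Python) =====
-- def create_numeric_classes(train_classes, valid_classes, test_classes):
--     uniq = sorted(set(train_classes + valid_classes + test_classes))
--     rank = {c: i + 1 for i, c in enumerate(uniq)}
--     return ([rank[c] for c in train_classes],
--             [rank[c] for c in valid_classes],
--             [rank[c] for c in test_classes])
-- ===== Notes on version B (the rewrite author's own statement) =====
-- stated objective: faster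
-- what changed: Replaces A's loop over every unique class that rescans all three input lists with a rank dictionary built once from the sorted unique classes and a single lookup pass over each list.
import Mathlib
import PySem

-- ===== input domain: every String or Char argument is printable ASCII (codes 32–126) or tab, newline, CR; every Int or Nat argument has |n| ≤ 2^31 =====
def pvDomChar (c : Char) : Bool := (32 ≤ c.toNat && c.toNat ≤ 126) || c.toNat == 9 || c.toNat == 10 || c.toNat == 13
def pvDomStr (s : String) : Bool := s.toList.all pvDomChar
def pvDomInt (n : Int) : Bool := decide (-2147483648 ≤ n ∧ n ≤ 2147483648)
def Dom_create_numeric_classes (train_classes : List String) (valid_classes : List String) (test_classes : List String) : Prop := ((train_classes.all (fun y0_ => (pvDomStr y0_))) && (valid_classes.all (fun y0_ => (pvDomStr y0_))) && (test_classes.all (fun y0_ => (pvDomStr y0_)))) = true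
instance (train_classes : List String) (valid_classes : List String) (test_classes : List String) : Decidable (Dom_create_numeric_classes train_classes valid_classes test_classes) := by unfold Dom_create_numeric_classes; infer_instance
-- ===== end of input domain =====

-- B replaces A's per-unique-class rescans of the three lists by one rank dictionary and one lookup pass per list (objective: faster).

-- ===== PORT A =====
def create_numeric_classes (train_classes : List String) (valid_classes : List String) (test_classes : List String) : List Int × List Int × List Int :=
  let classes := train_classes ++ valid_classes ++ test_classes
  let uniq_classes := PySem.List.sorted (PySem.Set.ofList classes) (fun x => x) false
  let train0 := List.replicate train_classes.length (0 : Int)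
  let valid0 := List.replicate valid_classes.length (0 : Int)
  let test0 := List.replicate test_classes.length (0 : Int)
  (PySem.List.pyRange 0 (uniq_classes.length : Int) 1).foldl
    (fun (st : List Int × List Int × List Int) ix =>
      let u := PySem.List.pyGetD uniq_classes ix ""   -- uniq_classes[ix]; ix always in range
      let idx1 := (PySem.List.enumerate train_classes 0).filterMap (fun p => if p.2 = u then some p.1 else none)
      let t := idx1.foldl (fun l i => PySem.List.pySetD l i (ix + 1)) st.1
      let idx2 := (PySem.List.enumerate valid_classes 0).filterMap (fun p => if p.2 = u then some p.1 else none)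
      let v := idx2.foldl (fun l i => PySem.List.pySetD l i (ix + 1)) st.2.1
      let idx3 := (PySem.List.enumerate test_classes 0).filterMap (fun p => if p.2 = u then some p.1 else none)
      let te := idx3.foldl (fun l i => PySem.List.pySetD l i (ix + 1)) st.2.2
      (t, v, te))
    (train0, valid0, test0)

-- ===== PORT B =====
-- rank[c] in Source B never raises (every c occurs in uniq), so Dict.getD with an unused default 0 is exact here.
def create_numeric_classes_alt (train_classes : List String) (valid_classes : List String) (test_classes : List String) : List Int × List Int × List Int :=
  let uniq := PySem.List.sorted (PySem.Set.ofList (train_classes ++ valid_classes ++ test_classes)) (fun x => x) false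
  let rank := (PySem.List.enumerate uniq 0).foldl (fun d p => d.insert p.2 (p.1 + 1)) PySem.Dict.empty
  (train_classes.map (fun c => rank.getD c 0),
   valid_classes.map (fun c => rank.getD c 0),
   test_classes.map (fun c => rank.getD c 0))

-- ===== PRECONDITION & SPEC =====
def Spec_create_numeric_classes (train_classes : List String) (valid_classes : List String) (test_classes : List String) (out : List Int × List Int × List Int) : Prop := out = create_numeric_classes_alt train_classes valid_classes test_classes
instance (train_classes : List String) (valid_classes : List String) (test_classes : List String) (out : List Int × List Int × List Int) : Decidable (Spec_create_numeric_classes train_classes valid_classes test_classes out) := by unfold Spec_create_numeric_classes; infer_instance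

-- ===== CLAIM (what is proved, stated in full; the proofs are below) =====
def Claim_equal_create_numeric_classes : Prop := ∀ (train_classes : List String) (valid_classes : List String) (test_classes : List String), Dom_create_numeric_classes train_classes valid_classes test_classes → Spec_create_numeric_classes train_classes valid_classes test_classes (create_numeric_classes train_classes valid_classes test_classes)

-- ===== LEMMAS AND PROOFS =====

-- the rank value f_k c carried by A's loop after the first k unique classes have been processed
def pvRankUpTo (uniq : List String) (k : Nat) (c : String) : Int :=
  if uniq.idxOf c < k then (uniq.idxOf c : Int) + 1 else 0

-- B's dictionary: lookups missing from the enumerated keys are untouched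
lemma rank_getD_not_mem (xs : List String) (c : String) :
    ∀ (s : Int) (d : PySem.Dict String Int), c ∉ xs →
      ((PySem.List.enumerate xs s).foldl (fun d p => d.insert p.2 (p.1 + 1)) d).getD c 0 = d.getD c 0 := by
  induction xs with
  | nil => intro s d _; simp [PySem.List.enumerate_nil]
  | cons x xs ih =>
    intro s d hc
    simp only [PySem.List.enumerate_cons, List.foldl_cons]
    rw [ih (s + 1) _ (fun h => hc (List.mem_cons_of_mem _ h))]
    exact PySem.Dict.getD_insert_of_ne d _ _ (fun h => hc (h ▸ List.mem_cons_self))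

-- B's dictionary assigns each class its enumeration rank
lemma rank_getD (xs : List String) (c : String) :
    ∀ (s : Int) (d : PySem.Dict String Int), xs.Nodup → c ∈ xs →
      ((PySem.List.enumerate xs s).foldl (fun d p => d.insert p.2 (p.1 + 1)) d).getD c 0
        = s + (xs.idxOf c : Int) + 1 := by
  induction xs with
  | nil => intro _ _ _ h; simp at h
  | cons x xs ih =>
    intro s d hnd hc
    simp only [PySem.List.enumerate_cons, List.foldl_cons]
    by_cases hcx : c = x
    · subst hcx
      rw [rank_getD_not_mem xs c (s + 1) _ (List.nodup_cons.mp hnd).1]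
      simp [PySem.Dict.getD_insert_self, List.idxOf_cons_self]
    · have hc' : c ∈ xs := by
        cases List.mem_cons.mp hc with
        | inl h => exact absurd h hcx
        | inr h => exact h
      rw [ih (s + 1) _ (List.nodup_cons.mp hnd).2 hc']
      rw [List.idxOf_cons_ne _ (fun h => hcx h.symm)]
      push_cast; ring

-- writing v at a list of nonnegative indices, element by element
lemma foldl_pySetD_getElem? (I : List Int) (hI : ∀ i ∈ I, 0 ≤ i) (L : List Int) (v : Int) (j : Nat) :
    (I.foldl (fun l i => PySem.List.pySetD l i v) L)[j]? =
      if (j : Int) ∈ I ∧ j < L.length then some v else L[j]? := by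
  induction I generalizing L with
  | nil => simp
  | cons i I ih =>
    have hi : 0 ≤ i := hI i List.mem_cons_self
    have hI' : ∀ i ∈ I, 0 ≤ i := fun a ha => hI a (List.mem_cons_of_mem _ ha)
    simp only [List.foldl_cons, PySem.List.pySetD_of_nonneg _ _ hi]
    rw [ih hI']
    simp only [List.length_set, List.getElem?_set, List.mem_cons]
    by_cases hji : (j : Int) = i
    · have : i.toNat = j := by omega
      subst this
      by_cases hjl : i.toNat < L.length <;> simp [hjl, hji]
    · have : ¬ i.toNat = j := by omega
      simp [this, hji]

-- the indices A writes to for class u are exactly the positions holding u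
lemma mem_pick (xs : List String) (u : String) (j : Int) :
    j ∈ (PySem.List.enumerate xs 0).filterMap (fun p => if p.2 = u then some p.1 else none) ↔
      ∃ k : Nat, ∃ _ : k < xs.length, (j : Int) = k ∧ xs[k] = u := by
  simp only [List.mem_filterMap, Option.ite_none_right_eq_some, Option.some.injEq]
  constructor
  · rintro ⟨⟨a, b⟩, hp, hb, ha⟩
    obtain ⟨k, hk, hpe⟩ := (PySem.List.mem_enumerate_iff xs 0 (a, b)).mp hp
    refine ⟨k, hk, ?_, ?_⟩ <;> simp_all [Prod.ext_iff]
  · rintro ⟨k, hk, hj, hu⟩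
    exact ⟨((k : Int), xs[k]), (PySem.List.mem_enumerate_iff xs 0 _).mpr ⟨k, hk, by simp⟩, hu, hj.symm⟩

lemma pick_nonneg (xs : List String) (u : String) :
    ∀ j ∈ (PySem.List.enumerate xs 0).filterMap (fun p => if p.2 = u then some p.1 else none), 0 ≤ j := by
  intro j hj
  obtain ⟨k, _, hj, _⟩ := (mem_pick xs u j).mp hj
  omega

-- one pass of A's inner write loop turns map f into map (overwrite u ↦ v)
lemma step_writes (xs : List String) (u : String) (v : Int) (f : String → Int) :
    ((PySem.List.enumerate xs 0).filterMap (fun p => if p.2 = u then some p.1 else none)).foldl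
        (fun l i => PySem.List.pySetD l i v) (xs.map f)
      = xs.map (fun c => if c = u then v else f c) := by
  apply List.ext_getElem?
  intro j
  rw [foldl_pySetD_getElem? _ (pick_nonneg xs u) _ v j]
  by_cases hj : j < xs.length
  · have h1 : (xs.map f)[j]? = some (f xs[j]) := by simp [hj]
    have h2 : (xs.map (fun c => if c = u then v else f c))[j]? = some (if xs[j] = u then v else f xs[j]) := by
      simp [hj]
    rw [h2]
    by_cases hu : xs[j] = u
    · rw [if_pos (by rw [mem_pick]; exact ⟨⟨j, hj, rfl, hu⟩, by simpa using hj⟩)]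
      simp [hu]
    · rw [if_neg, h1, if_neg hu]
      rintro ⟨hmem, -⟩
      obtain ⟨k, hk, hjk, hku⟩ := (mem_pick xs u _).mp hmem
      have : k = j := by omega
      exact hu (this ▸ hku)
  · have h1 : (xs.map f)[j]? = none := by simp; omega
    have h2 : (xs.map (fun c => if c = u then v else f c))[j]? = none := by simp; omega
    rw [h1, h2, if_neg]
    rintro ⟨-, h⟩
    simp at h; omega

-- the overwrite at step k is exactly the rank-prefix function one step further
lemma overwrite_eq_succ (uniq : List String) (hnd : uniq.Nodup) (k : Nat) (hk : k < uniq.length) :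
    (fun c => if c = uniq[k] then (k : Int) + 1 else pvRankUpTo uniq k c) = pvRankUpTo uniq (k + 1) := by
  funext c
  by_cases hc : c = uniq[k]
  · have h2 : List.idxOf uniq[k] uniq = k := List.Nodup.idxOf_getElem hnd k hk
    simp [hc, pvRankUpTo, h2]
  · have hne : uniq.idxOf c ≠ k := by
      intro h
      have hlt : uniq.idxOf c < uniq.length := h ▸ hk
      have := List.getElem_idxOf hlt
      exact hc (by rw [← this]; congr 1)
    have : uniq.idxOf c < k + 1 ↔ uniq.idxOf c < k := by omega
    simp [hc, pvRankUpTo, this]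

-- A's outer loop invariant: after the first k unique classes, every list is map (pvRankUpTo uniq k)
lemma loop_invariant (train_classes valid_classes test_classes : List String) (uniq : List String)
    (hnd : uniq.Nodup) (k : Nat) (hk : k ≤ uniq.length) :
    (PySem.List.pyRange 0 (k : Int) 1).foldl
      (fun (st : List Int × List Int × List Int) ix =>
        let u := PySem.List.pyGetD uniq ix ""
        let idx1 := (PySem.List.enumerate train_classes 0).filterMap (fun p => if p.2 = u then some p.1 else none)
        let t := idx1.foldl (fun l i => PySem.List.pySetD l i (ix + 1)) st.1
        let idx2 := (PySem.List.enumerate valid_classes 0).filterMap (fun p => if p.2 = u then some p.1 else none)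
        let v := idx2.foldl (fun l i => PySem.List.pySetD l i (ix + 1)) st.2.1
        let idx3 := (PySem.List.enumerate test_classes 0).filterMap (fun p => if p.2 = u then some p.1 else none)
        let te := idx3.foldl (fun l i => PySem.List.pySetD l i (ix + 1)) st.2.2
        (t, v, te))
      (List.replicate train_classes.length (0 : Int),
       List.replicate valid_classes.length (0 : Int),
       List.replicate test_classes.length (0 : Int))
    = (train_classes.map (pvRankUpTo uniq k),
       valid_classes.map (pvRankUpTo uniq k),
       test_classes.map (pvRankUpTo uniq k)) := by
  induction k with
  | zero =>
    have h0 : pvRankUpTo uniq 0 = fun _ => (0 : Int) := by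
      funext c; simp [pvRankUpTo]
    simp [PySem.List.pyRange, h0, List.map_const']
  | succ k ih =>
    have hk' : k ≤ uniq.length := by omega
    have hklt : k < uniq.length := by omega
    have hrange : PySem.List.pyRange 0 ((k : Int) + 1) 1 = PySem.List.pyRange 0 (k : Int) 1 ++ [(k : Int)] :=
      PySem.List.pyRange_one_succ_right (by omega)
    push_cast
    rw [hrange, List.foldl_append, ih hk']
    simp only [List.foldl_cons, List.foldl_nil]
    have hu : PySem.List.pyGetD uniq (k : Int) "" = uniq[k] := by
      rw [PySem.List.pyGetD_natCast]
      exact List.getD_eq_getElem _ _ hklt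
    simp only [hu, step_writes]
    rw [overwrite_eq_succ uniq hnd k hklt]

-- ===== VERDICT (by name: the statement is the Claim_ definition above) =====
theorem create_numeric_classes_spec : Claim_equal_create_numeric_classes := by
  intro train_classes valid_classes test_classes _
  unfold Spec_create_numeric_classes create_numeric_classes create_numeric_classes_alt
  set classes := train_classes ++ valid_classes ++ test_classes with hclasses
  set uniq := PySem.List.sorted (PySem.Set.ofList classes) (fun x => x) false with huniq
  have hnd : uniq.Nodup := (PySem.List.sorted_ofList_pairwise_lt classes).nodup
  have hmem : ∀ c ∈ classes, c ∈ uniq := by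
    intro c hc
    rw [huniq, PySem.List.mem_sorted, PySem.Set.mem_ofList]
    exact hc
  have key : ∀ xs : List String, (∀ c ∈ xs, c ∈ classes) →
      xs.map (pvRankUpTo uniq uniq.length)
        = xs.map (fun c => ((PySem.List.enumerate uniq 0).foldl
            (fun d p => d.insert p.2 (p.1 + 1)) PySem.Dict.empty).getD c 0) := by
    intro xs hxs
    apply List.map_congr_left
    intro c hc
    have hcu : c ∈ uniq := hmem c (hxs c hc)
    rw [rank_getD uniq c 0 PySem.Dict.empty hnd hcu]
    have : uniq.idxOf c < uniq.length := List.idxOf_lt_length_iff.mpr hcu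
    simp [pvRankUpTo, this]
  rw [loop_invariant train_classes valid_classes test_classes uniq hnd uniq.length le_rfl]
  refine Prod.ext ?_ (Prod.ext ?_ ?_) <;> simp only
  · exact key train_classes (fun c hc => by simp [hclasses, hc])
  · exact key valid_classes (fun c hc => by simp [hclasses, hc])
  · exact key test_classes (fun c hc => by simp [hclasses, hc])
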